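-- pv_equiv track=rewrite | github.com/quixoteji/Leetcode | 302.smallest-rectangle-enclosing-black-pixels.py | searchRows
-- ===== SOURCE A (Python) =====
-- def searchRows(image, i, j, opt):
--     while i != j:
--         m = (i + j) // 2
--         if ('1' in image[m]) == opt:
--             j = m
--         else:
--             i = m + 1
--     return i
-- ===== SOURCE B (Python) =====
-- def searchRows(image, i, j, opt):
--     def go(lo, n):
--         if n == 0:
--             return lo
--         k = n // 2
--         m = lo + k
--         if ('1' in image[m]) == opt:
--             return go(lo, k)
--         return go(m + 1, n - k - 1)
--     return go(i, j - i)
-- ===== Notes on version B (the rewrite author's own statement) =====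
-- stated objective: alternative
-- what changed: B reformulates the bisection as recursion on the LENGTH of the remaining range: go(lo, n) keeps only the left bound and a count, with base case n == 0 and midpoint lo + n//2, instead of A's while loop mutating both bounds i and j with midpoint (i + j) // 2.
-- outside the precondition, e.g. on searchRows(['0', '1', '1'], 0, 5, True): A returns 1, B returns 1
import Mathlib
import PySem

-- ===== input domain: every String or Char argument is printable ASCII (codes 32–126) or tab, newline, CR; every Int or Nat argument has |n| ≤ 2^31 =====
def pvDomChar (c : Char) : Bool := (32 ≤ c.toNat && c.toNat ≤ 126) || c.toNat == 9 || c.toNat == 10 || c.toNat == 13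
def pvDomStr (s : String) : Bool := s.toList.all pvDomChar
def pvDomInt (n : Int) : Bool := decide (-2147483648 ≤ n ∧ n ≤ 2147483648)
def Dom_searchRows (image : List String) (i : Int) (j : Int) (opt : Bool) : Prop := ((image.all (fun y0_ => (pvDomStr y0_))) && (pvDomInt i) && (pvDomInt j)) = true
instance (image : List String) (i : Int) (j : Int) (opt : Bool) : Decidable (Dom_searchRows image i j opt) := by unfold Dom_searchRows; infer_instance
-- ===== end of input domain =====

-- B recurses on the length of the remaining range (lo, n) with midpoint lo + n//2, instead of A's while loop over both bounds (alternative decomposition; same result).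


-- ===== PORT A =====
-- A's while loop as fuel-bounded tail recursion over the state (i, j); fuel (j-i).toNat+1
-- only makes the loop total (inside Pre_ each step shrinks j-i by at least 1, so fuel never runs out).
def searchRowsLoop (image : List String) (opt : Bool) : Nat → Int → Int → Int
  | 0, i, _ => i
  | fuel+1, i, j =>
    if i = j then i
    else
      let m := PySem.Int.floordiv (i + j) 2
      if PySem.Str.isIn "1" ((PySem.List.pyGet? image m).getD "") = opt then
        searchRowsLoop image opt fuel i m
      else
        searchRowsLoop image opt fuel (m + 1) j

def searchRows (image : List String) (i : Int) (j : Int) (opt : Bool) : Int :=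
  searchRowsLoop image opt ((j - i).toNat + 1) i j

-- ===== PORT B =====
-- Source B's inner 'go lo n': recursion on the Nat length n of the remaining range.
def searchRowsGo (image : List String) (opt : Bool) : Int → Nat → Int
  | lo, 0 => lo
  | lo, Nat.succ p =>
    let k := (p + 1) / 2
    let m := lo + (k : Int)
    if PySem.Str.isIn "1" ((PySem.List.pyGet? image m).getD "") = opt then
      searchRowsGo image opt lo k
    else
      searchRowsGo image opt (m + 1) (p + 1 - k - 1)
  decreasing_by all_goals omega

def searchRows_alt (image : List String) (i : Int) (j : Int) (opt : Bool) : Int :=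
  searchRowsGo image opt i (j - i).toNat

-- ===== PRECONDITION & SPEC =====
-- Pre_ excludes i > j (A's while loop never terminates there) and bisection ranges reaching
-- outside Python's valid index range (IndexError on image[m]); it keeps the sufficient
-- closed-form bound -len <= i and j <= len when i < j, which also excludes rare inputs whose
-- bisection path happens to stay in range (A and B return the same value there; see cites).
def Pre_searchRows (image : List String) (i : Int) (j : Int) (opt : Bool) : Prop :=
  i = j ∨ (i < j ∧ -(image.length : Int) ≤ i ∧ j ≤ (image.length : Int))
instance (image : List String) (i : Int) (j : Int) (opt : Bool) : Decidable (Pre_searchRows image i j opt) := by unfold Pre_searchRows; infer_instance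

def pvWitness_searchRows : List String × Int × Int × Bool := (["01", "00", "10"], 0, 3, true)

def Spec_searchRows (image : List String) (i : Int) (j : Int) (opt : Bool) (out : Int) : Prop := out = searchRows_alt image i j opt
instance (image : List String) (i : Int) (j : Int) (opt : Bool) (out : Int) : Decidable (Spec_searchRows image i j opt out) := by unfold Spec_searchRows; infer_instance

-- ===== CLAIM (what is proved, stated in full; the proofs are below) =====
def Claim_equal_searchRows : Prop := ∀ (image : List String) (i : Int) (j : Int) (opt : Bool), Dom_searchRows image i j opt → Pre_searchRows image i j opt → Spec_searchRows image i j opt (searchRows image i j opt)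

-- ===== LEMMAS AND PROOFS =====

-- With j = i + n (n = length of the range), A's midpoint (i + j) // 2 is exactly B's i + n/2.
theorem mid_eq (i : Int) (n : Nat) :
    PySem.Int.floordiv (i + (i + (n : Int))) 2 = i + ((n / 2 : Nat) : Int) := by
  rw [PySem.Int.floordiv_eq_ediv_of_pos (by omega)]
  omega

-- The loop with enough fuel computes go on the range length.
theorem loop_eq_go (image : List String) (opt : Bool) :
    ∀ (f : Nat) (i j : Int), i ≤ j → (j - i).toNat < f →
      searchRowsLoop image opt f i j = searchRowsGo image opt i (j - i).toNat := by
  intro f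
  induction f with
  | zero => intro i j _ h; omega
  | succ f ih =>
    intro i j hij hf
    by_cases heq : i = j
    · subst heq
      simp [searchRowsLoop, searchRowsGo]
    · have hlt : i < j := lt_of_le_of_ne hij heq
      obtain ⟨p, hp⟩ : ∃ p : Nat, (j - i).toNat = p + 1 := ⟨(j - i).toNat - 1, by omega⟩
      have hj : j = i + ((p : Int) + 1) := by omega
      rw [hp]
      simp only [searchRowsLoop, if_neg heq, searchRowsGo]
      have hm : PySem.Int.floordiv (i + j) 2 = i + (((p + 1) / 2 : Nat) : Int) := by
        have := mid_eq i (p + 1)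
        rw [hj]; push_cast at this ⊢; omega
      rw [hm]
      split_ifs with hc
      · rw [ih i (i + (((p + 1) / 2 : Nat) : Int)) (by omega) (by omega)]
        congr 1
        omega
      · rw [ih (i + (((p + 1) / 2 : Nat) : Int) + 1) j (by omega) (by omega)]
        congr 1
        omega

-- ===== VERDICT (by name: the statement is the Claim_ definition above) =====
theorem searchRows_spec : Claim_equal_searchRows := by
  intro image i j opt _ hpre
  unfold Spec_searchRows searchRows searchRows_alt
  have hij : i ≤ j := by rcases hpre with h | h; omega; omega
  exact loop_eq_go image opt _ i j hij (by omega)
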